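-- pv_equiv track=rewrite | github.com/MadCom96/Study | Programmers/억억단을외우자.py | solution
-- ===== SOURCE A (Python) =====
-- def solution(e, starts):
--     checker = [1 for i in range(e + 1)]
--     lim = e
--     for i in range(2, e + 1):
--         ii = i * i
--         if ii <= e:
--             checker[i * i] += 1
--             for j in range(i + 1, e + 1):
--                 if i * j <= e:
--                     checker[i * j] += 2
--                 else:
--                     break
--         else:
--             break
--     dp = [0 for i in range(e + 1)]
--     highdp = -1
--     highind = -1
--     for i in range(len(checker)-1, 0, -1):
--         if highdp <= checker[i]:
--             highdp = checker[i]
--             highind = i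
--         dp[i] = highind
--     ans = []
--     for s in starts:
--         ans.append(dp[s])
--     return ans
-- ===== SOURCE B (Python) =====
-- def solution(e, starts):
--     # divisor-count sieve over multiples, instead of A's factor-pair double loop
--     d = [0] * (e + 1)
--     for i in range(1, e + 1):
--         for j in range(i, e + 1, i):
--             d[j] += 1
--     checker = [c - 1 if n >= 2 else 1 for n, c in enumerate(d)]
--     dp = [0] * (e + 1)
--     highdp = -1
--     highind = -1
--     for i in range(e, 0, -1):
--         if highdp <= checker[i]:
--             highdp = checker[i]
--             highind = i
--         dp[i] = highind
--     return [dp[s] for s in starts]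
-- ===== Notes on version B (the rewrite author's own statement) =====
-- stated objective: idiomatic
-- what changed: Replaces A's break-guarded factor-pair double loop (bumping checker[i*i] by 1 and checker[i*j] by 2) with the standard harmonic multiples sieve that counts each divisor once, then derives checker[n] = d(n) - 1 for n >= 2; the suffix-max pass and query lookups are kept.
import Mathlib
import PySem

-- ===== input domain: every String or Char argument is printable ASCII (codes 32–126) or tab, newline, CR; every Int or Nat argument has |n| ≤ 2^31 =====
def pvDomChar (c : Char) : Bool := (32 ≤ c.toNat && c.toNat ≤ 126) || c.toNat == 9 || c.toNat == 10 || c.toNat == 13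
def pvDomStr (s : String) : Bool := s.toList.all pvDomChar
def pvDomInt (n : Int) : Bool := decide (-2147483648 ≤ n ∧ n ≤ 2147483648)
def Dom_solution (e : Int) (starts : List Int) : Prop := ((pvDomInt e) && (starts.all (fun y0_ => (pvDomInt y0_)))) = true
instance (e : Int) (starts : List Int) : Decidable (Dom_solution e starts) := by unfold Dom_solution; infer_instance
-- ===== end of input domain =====

-- B replaces A's break-guarded factor-pair double loop by a multiples divisor sieve
-- (checker[n] = d(n) - 1 for n ≥ 2); the suffix-max pass and query lookups are unchanged.

-- ===== PORT A =====
-- 'xs[k] += v' (in-range in all executed paths of both programs)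
def pvBump (xs : List Int) (k : Int) (v : Int) : List Int :=
  PySem.List.pySetD xs k (PySem.List.pyGetD xs k 0 + v)

-- inner 'for j in range(i+1, e+1): if i*j <= e: checker[i*j] += 2 else: break'
def solA_inner (e i : Int) : List Int → List Int → List Int
  | [], checker => checker
  | j :: rest, checker =>
      if i * j ≤ e then solA_inner e i rest (pvBump checker (i * j) 2) else checker

-- outer 'for i in range(2, e+1): if i*i <= e: … else: break'
def solA_outer (e : Int) : List Int → List Int → List Int
  | [], checker => checker
  | i :: rest, checker =>
      if i * i ≤ e then
        solA_outer e rest (solA_inner e i (PySem.List.pyRange (i + 1) (e + 1) 1) (pvBump checker (i * i) 1))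
      else checker

-- 'for i in range(len(checker)-1, 0, -1): …' building (dp, highdp, highind)
def solA_dp (checker : List Int) : List Int → List Int × Int × Int → List Int × Int × Int
  | [], st => st
  | i :: rest, (dp, highdp, highind) =>
      let c := PySem.List.pyGetD checker i 0
      let p := if highdp ≤ c then (c, i) else (highdp, highind)
      solA_dp checker rest (PySem.List.pySetD dp i p.2, p.1, p.2)

def solution (e : Int) (starts : List Int) : List Int :=
  let checker0 := (PySem.List.pyRange 0 (e + 1) 1).map (fun _ => (1 : Int))
  let checker := solA_outer e (PySem.List.pyRange 2 (e + 1) 1) checker0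
  let dp0 := (PySem.List.pyRange 0 (e + 1) 1).map (fun _ => (0 : Int))
  let st := solA_dp checker (PySem.List.pyRange ((checker.length : Int) - 1) 0 (-1)) (dp0, -1, -1)
  starts.map (fun s => PySem.List.pyGetD st.1 s 0)

-- ===== PORT B =====
-- 'for i in range(1, e+1): for j in range(i, e+1, i): d[j] += 1'
def solB_sieve (e : Int) : List Int :=
  (PySem.List.pyRange 1 (e + 1) 1).foldl
    (fun d i => (PySem.List.pyRange i (e + 1) i).foldl (fun d j => pvBump d j 1) d)
    ((PySem.List.pyRange 0 (e + 1) 1).map (fun _ => (0 : Int)))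

-- 'for i in range(e, 0, -1): …' (same loop body as A's dp pass, as in Source B)
def solB_dp (checker : List Int) : List Int → List Int × Int × Int → List Int × Int × Int
  | [], st => st
  | i :: rest, (dp, highdp, highind) =>
      let c := PySem.List.pyGetD checker i 0
      let p := if highdp ≤ c then (c, i) else (highdp, highind)
      solB_dp checker rest (PySem.List.pySetD dp i p.2, p.1, p.2)

def solution_alt (e : Int) (starts : List Int) : List Int :=
  let d := solB_sieve e
  let checker := (PySem.List.enumerate d 0).map (fun nc => if 2 ≤ nc.1 then nc.2 - 1 else 1)
  let dp0 := (PySem.List.pyRange 0 (e + 1) 1).map (fun _ => (0 : Int))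
  let st := solB_dp checker (PySem.List.pyRange e 0 (-1)) (dp0, -1, -1)
  starts.map (fun s => PySem.List.pyGetD st.1 s 0)

-- ===== PRECONDITION & SPEC =====
-- Pre_ excludes exactly the inputs where Python A raises IndexError: a query s outside
-- the valid (negative indexing included) index range of dp, a list of length e+1.
def Pre_solution (e : Int) (starts : List Int) : Prop :=
  ∀ s ∈ starts, -(e + 1) ≤ s ∧ s ≤ e
instance (e : Int) (starts : List Int) : Decidable (Pre_solution e starts) := by
  unfold Pre_solution; infer_instance

def pvWitness_solution : Int × List Int := (8, [1, 3, 6, 8])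

def Spec_solution (e : Int) (starts : List Int) (out : List Int) : Prop := out = solution_alt e starts
instance (e : Int) (starts : List Int) (out : List Int) : Decidable (Spec_solution e starts out) := by
  unfold Spec_solution; infer_instance

-- ===== CLAIM (what is proved, stated in full; the proofs are below) =====
def Claim_equal_solution : Prop := ∀ (e : Int) (starts : List Int), Dom_solution e starts → Pre_solution e starts → Spec_solution e starts (solution e starts)

-- ===== LEMMAS AND PROOFS =====
theorem length_pvBump (xs : List Int) (k v : Int) : (pvBump xs k v).length = xs.length := by
  simp [pvBump, PySem.List.length_pySetD]

theorem getD_pvBump (xs : List Int) (k : Int) (v : Int) (hk : 0 ≤ k) (n : Nat) (hn : n < xs.length) :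
    (pvBump xs k v).getD n 0 = if k = (n : Int) then xs.getD n 0 + v else xs.getD n 0 := by
  unfold pvBump
  rw [PySem.List.pySetD_of_nonneg _ _ hk]
  by_cases hlt : k < (xs.length : Int)
  · rw [PySem.List.pyGetD_eq_getElem _ _ hk hlt]
    by_cases heq : k = (n : Int)
    · subst heq
      simp only [Int.toNat_natCast]
      rw [List.getD_eq_getElem _ _ (by simpa using hn), List.getD_eq_getElem _ _ hn]
      simp
    · have hne : k.toNat ≠ n := by omega
      rw [List.getD_eq_getElem _ _ (by simpa using hn), List.getD_eq_getElem _ _ hn]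
      simp [hne, heq]
  · have hle : xs.length ≤ k.toNat := by omega
    rw [List.set_eq_of_length_le hle]
    have : k ≠ (n:Int) := by omega
    simp [this]

theorem getD_foldl_pvBump (f : Int → Int) (v : Int) :
    ∀ (js : List Int) (xs : List Int) (n : Nat), (∀ j ∈ js, 0 ≤ f j) → n < xs.length →
    (js.foldl (fun c j => pvBump c (f j) v) xs).getD n 0
      = xs.getD n 0 + v * (js.countP (fun j => f j = (n : Int)) : Int) := by
  intro js
  induction js with
  | nil => intro xs n _ _; simp
  | cons j rest ih =>
    intro xs n hpos hn
    simp only [List.foldl_cons]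
    rw [ih _ n (fun x hx => hpos x (List.mem_cons_of_mem _ hx)) (by rw [length_pvBump]; exact hn)]
    rw [getD_pvBump xs (f j) v (hpos j (List.mem_cons_self)) n hn]
    rw [List.countP_cons]
    by_cases h : f j = (n : Int) <;> simp [h] <;> ring

theorem length_foldl_pvBump (f : Int → Int) (v : Int) (js : List Int) (xs : List Int) :
    (js.foldl (fun c j => pvBump c (f j) v) xs).length = xs.length := by
  induction js generalizing xs with
  | nil => rfl
  | cons j rest ih => simp [List.foldl_cons, ih, length_pvBump]

theorem solA_inner_eq (e i : Int) (hi : 0 ≤ i) :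
    ∀ js : List Int, js.Pairwise (· ≤ ·) → ∀ c,
    solA_inner e i js c
      = (js.filter (fun j => decide (i * j ≤ e))).foldl (fun c j => pvBump c (i * j) 2) c := by
  intro js
  induction js with
  | nil => intro _ c; rfl
  | cons j rest ih =>
    intro hp c
    have hrest := hp.of_cons
    have hj : ∀ x ∈ rest, j ≤ x := fun x hx => (List.pairwise_cons.1 hp).1 x hx
    by_cases h : i * j ≤ e
    · simp only [solA_inner, h, if_true, List.filter_cons]
      exact ih hrest _
    · simp only [solA_inner, h, if_false, List.filter_cons]
      have : ∀ x ∈ rest, ¬ (i * x ≤ e) := by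
        intro x hx hc
        exact h (le_trans (mul_le_mul_of_nonneg_left (hj x hx) hi) hc)
      have hf : rest.filter (fun j => decide (i * j ≤ e)) = [] := by
        rw [List.filter_eq_nil_iff]; intro x hx; simpa using this x hx
      simp [hf]

theorem solA_outer_eq (e : Int) :
    ∀ is : List Int, is.Pairwise (· ≤ ·) → (∀ i ∈ is, 0 ≤ i) → ∀ c,
    solA_outer e is c
      = (is.filter (fun i => decide (i * i ≤ e))).foldl
          (fun c i => solA_inner e i (PySem.List.pyRange (i + 1) (e + 1) 1) (pvBump c (i * i) 1)) c := by
  intro is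
  induction is with
  | nil => intro _ _ c; rfl
  | cons i rest ih =>
    intro hp hpos c
    have hrest := hp.of_cons
    have hi : ∀ x ∈ rest, i ≤ x := fun x hx => (List.pairwise_cons.1 hp).1 x hx
    by_cases h : i * i ≤ e
    · simp only [solA_outer, h, if_true, List.filter_cons]
      exact ih hrest (fun x hx => hpos x (List.mem_cons_of_mem _ hx)) _
    · simp only [solA_outer, h, if_false, List.filter_cons]
      have : ∀ x ∈ rest, ¬ (x * x ≤ e) := by
        intro x hx hc
        have h0 : 0 ≤ i := hpos i List.mem_cons_self
        exact h (le_trans (mul_le_mul (hi x hx) (hi x hx) h0 (le_trans h0 (hi x hx))) hc)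
      have hf : rest.filter (fun x => decide (x * x ≤ e)) = [] := by
        rw [List.filter_eq_nil_iff]; intro x hx; simpa using this x hx
      simp [hf]

theorem length_solA_inner (e i : Int) : ∀ (js : List Int) (c : List Int),
    (solA_inner e i js c).length = c.length := by
  intro js
  induction js with
  | nil => intro c; rfl
  | cons j rest ih =>
    intro c
    by_cases h : i * j ≤ e <;> simp [solA_inner, h, ih, length_pvBump]

theorem length_solA_outer (e : Int) : ∀ (is : List Int) (c : List Int),
    (solA_outer e is c).length = c.length := by
  intro is
  induction is with
  | nil => intro c; rfl
  | cons i rest ih =>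
    intro c
    by_cases h : i * i ≤ e <;> simp [solA_outer, h, ih, length_solA_inner, length_pvBump]

def cntJ (e : Int) (n : Nat) (i : Int) : Int :=
  ((PySem.List.pyRange (i + 1) (e + 1) 1).countP (fun j => decide (i * j ≤ e) && decide (i * j = (n : Int))) : Int)

def contribA (e : Int) (n : Nat) (i : Int) : Int :=
  (if i * i = (n : Int) then 1 else 0) + 2 * cntJ e n i

theorem getD_solA_step (e i : Int) (hi : 0 ≤ i) (c : List Int) (n : Nat) (hn : n < c.length) :
    (solA_inner e i (PySem.List.pyRange (i + 1) (e + 1) 1) (pvBump c (i * i) 1)).getD n 0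
      = c.getD n 0 + contribA e n i := by
  rw [solA_inner_eq e i hi _ ((PySem.List.pairwise_lt_pyRange_one _ _).imp le_of_lt)]
  rw [getD_foldl_pvBump (fun j => i * j) 2 _ _ n ?hpos (by rw [length_pvBump]; exact hn)]
  case hpos =>
    intro j hj
    have hj' := PySem.List.mem_pyRange_one.1 (List.mem_of_mem_filter hj)
    have : 0 ≤ j := by omega
    positivity
  rw [getD_pvBump c (i * i) 1 (by positivity) n hn]
  rw [List.countP_filter]
  unfold contribA cntJ
  by_cases h : i * i = (n : Int)
  · simp only [h, if_true]
    rw [show (fun (a : Int) => (decide (i * a = (n:Int)) && decide (i * a ≤ e)))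
        = (fun (a : Int) => (decide (i * a ≤ e) && decide (i * a = (n:Int)))) from by
      funext a; rw [Bool.and_comm]]
    ring
  · simp only [h, if_false]
    rw [show (fun (a : Int) => (decide (i * a = (n:Int)) && decide (i * a ≤ e)))
        = (fun (a : Int) => (decide (i * a ≤ e) && decide (i * a = (n:Int)))) from by
      funext a; rw [Bool.and_comm]]
    ring

theorem getD_solA_outer_fold (e : Int) (n : Nat) :
    ∀ is : List Int, (∀ i ∈ is, 0 ≤ i) → ∀ c : List Int, n < c.length →
    ((is.foldl (fun c i => solA_inner e i (PySem.List.pyRange (i + 1) (e + 1) 1) (pvBump c (i * i) 1)) c).getD n 0)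
      = c.getD n 0 + (is.map (contribA e n)).sum := by
  intro is
  induction is with
  | nil => intro _ c _; simp
  | cons i rest ih =>
    intro hpos c hn
    simp only [List.foldl_cons, List.map_cons, List.sum_cons]
    rw [ih (fun x hx => hpos x (List.mem_cons_of_mem _ hx)) _
        (by rw [length_solA_inner, length_pvBump]; exact hn)]
    rw [getD_solA_step e i (hpos i List.mem_cons_self) c n hn]
    ring

theorem sum_map_filter_of_vanish {α : Type} (p : α → Bool) (f : α → Int) :
    ∀ l : List α, (∀ x ∈ l, ¬ p x = true → f x = 0) →
    ((l.filter p).map f).sum = (l.map f).sum := by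
  intro l
  induction l with
  | nil => intro _; rfl
  | cons x rest ih =>
    intro h
    by_cases hx : p x = true
    · simp [hx, ih (fun y hy => h y (List.mem_cons_of_mem _ hy))]
    · simp [hx, ih (fun y hy => h y (List.mem_cons_of_mem _ hy)),
        h x List.mem_cons_self (by simp [hx])]

theorem contribA_vanish (e : Int) (n : Nat) (hn : (n : Int) ≤ e) (i : Int) (hi : 2 ≤ i)
    (h : ¬ (i * i ≤ e)) : contribA e n i = 0 := by
  unfold contribA cntJ
  have h1 : ¬ (i * i = (n : Int)) := by intro hc; rw [hc] at h; omega
  have h2 : (PySem.List.pyRange (i + 1) (e + 1) 1).countP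
      (fun j => decide (i * j ≤ e) && decide (i * j = (n : Int))) = 0 := by
    rw [List.countP_eq_zero]
    intro j hj
    have hj' := PySem.List.mem_pyRange_one.1 hj
    have : i * i ≤ i * j := by
      apply mul_le_mul_of_nonneg_left (by omega) (by omega)
    simp only [Bool.and_eq_true, decide_eq_true_eq]
    rintro ⟨hle, -⟩
    omega
  simp [h1, h2]

theorem checkerA_getD (e : Int) (n : Nat) (hn : (n : Int) < e + 1) :
    (solA_outer e (PySem.List.pyRange 2 (e + 1) 1)
        ((PySem.List.pyRange 0 (e + 1) 1).map (fun _ => (1 : Int)))).getD n 0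
      = 1 + ((PySem.List.pyRange 2 (e + 1) 1).map (contribA e n)).sum := by
  have hlen : ((PySem.List.pyRange 0 (e + 1) 1).map (fun _ => (1 : Int))).length = (e + 1).toNat := by
    simp [PySem.List.length_pyRange_one]
  have hnlen : n < ((PySem.List.pyRange 0 (e + 1) 1).map (fun _ => (1 : Int))).length := by
    rw [hlen]; omega
  rw [solA_outer_eq e _ ((PySem.List.pairwise_lt_pyRange_one _ _).imp le_of_lt)
    (fun i hi => by have := PySem.List.mem_pyRange_one.1 hi; omega)]
  rw [getD_solA_outer_fold e n _
    (fun i hi => by have := PySem.List.mem_pyRange_one.1 (List.mem_of_mem_filter hi); omega) _ hnlen]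
  rw [sum_map_filter_of_vanish _ _ _
    (fun i hi hni => contribA_vanish e n (by omega) i
      (by have := PySem.List.mem_pyRange_one.1 hi; omega) (by simpa using hni))]
  have hinit : ((PySem.List.pyRange 0 (e + 1) 1).map (fun _ => (1 : Int))).getD n 0 = 1 := by
    rw [List.getD_eq_getElem _ _ hnlen]
    simp
  rw [hinit]

theorem getD_sieve_fold (e : Int) (n : Nat) :
    ∀ is : List Int, (∀ i ∈ is, 1 ≤ i) → ∀ d : List Int, n < d.length →
    ((is.foldl (fun d i => (PySem.List.pyRange i (e + 1) i).foldl (fun d j => pvBump d j 1) d) d).getD n 0)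
      = d.getD n 0
        + (is.map (fun i => ((PySem.List.pyRange i (e + 1) i).countP (fun j => decide (j = (n : Int))) : Int))).sum := by
  intro is
  induction is with
  | nil => intro _ d _; simp
  | cons i rest ih =>
    intro hpos d hn
    simp only [List.foldl_cons, List.map_cons, List.sum_cons]
    have hi : (1:Int) ≤ i := hpos i List.mem_cons_self
    have hmem : ∀ j ∈ PySem.List.pyRange i (e + 1) i, 0 ≤ (fun (j:Int) => j) j := by
      intro j hj
      have := (PySem.List.mem_pyRange_iff_of_pos (by omega) j).1 hj
      simp; omega
    rw [ih (fun x hx => hpos x (List.mem_cons_of_mem _ hx)) _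
        (by rw [length_foldl_pvBump (fun j => j)]; exact hn)]
    rw [getD_foldl_pvBump (fun j => j) 1 _ _ n hmem hn]
    ring

theorem nodup_pyRange_pos (a b s : Int) (hs : 0 < s) : (PySem.List.pyRange a b s).Nodup := by
  rw [PySem.List.pyRange_of_pos a b hs]
  apply List.Nodup.map _ List.nodup_range
  intro x y hxy
  simp only at hxy
  have : s * (x:Int) = s * y := by omega
  have := mul_left_cancel₀ (by omega : (s:Int) ≠ 0) this
  exact_mod_cast this

theorem countP_multiples (e i : Int) (n : Nat) (hi : 1 ≤ i) (hn : (n : Int) ≤ e) :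
    ((PySem.List.pyRange i (e + 1) i).countP (fun j => decide (j = (n : Int))) : Int)
      = if i ∣ (n : Int) ∧ i ≤ (n : Int) then 1 else 0 := by
  have hnd := nodup_pyRange_pos i (e + 1) i (by omega)
  have hmem := PySem.List.mem_pyRange_iff_of_pos (a := i) (b := e + 1) (by omega : (0:Int) < i) (n : Int)
  have hdvd : i ∣ (n : Int) - i ↔ i ∣ (n : Int) := by
    constructor
    · intro h; have := dvd_add h (dvd_refl i); simpa using this
    · intro h; exact dvd_sub h (dvd_refl i)
  by_cases hc : i ∣ (n : Int) ∧ i ≤ (n : Int)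
  · have hin : (n : Int) ∈ PySem.List.pyRange i (e + 1) i := by
      rw [hmem]; exact ⟨hc.2, by omega, hdvd.2 hc.1⟩
    rw [show (List.countP (fun j => decide (j = (n:Int))) (PySem.List.pyRange i (e+1) i)) = List.count ((n:Int)) (PySem.List.pyRange i (e+1) i) from rfl]
    rw [List.count_eq_one_of_mem hnd hin]
    simp [hc]
  · have hnin : (n : Int) ∉ PySem.List.pyRange i (e + 1) i := by
      rw [hmem]; rintro ⟨h1, h2, h3⟩; exact hc ⟨hdvd.1 h3, h1⟩
    rw [show (List.countP (fun j => decide (j = (n:Int))) (PySem.List.pyRange i (e+1) i)) = List.count ((n:Int)) (PySem.List.pyRange i (e+1) i) from rfl]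
    rw [List.count_eq_zero_of_not_mem hnin]
    simp [hc]

theorem sum_map_ite_prop (l : List Int) (P : Int → Prop) [DecidablePred P] :
    (l.map (fun i => if P i then (1 : Int) else 0)).sum = (l.countP (fun i => decide (P i)) : Int) := by
  rw [← PySem.List.sum_map_ite_one_zero (fun i => decide (P i)) l]
  congr 1
  apply List.map_congr_left
  intro i _
  by_cases h : P i <;> simp [h]

theorem countP_pyRange_eq_card (a b : Int) (P : Int → Prop) [DecidablePred P] :
    (PySem.List.pyRange a b 1).countP (fun i => decide (P i)) = ((Finset.Ico a b).filter P).card := by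
  have hnd : (PySem.List.pyRange a b 1).Nodup := PySem.List.nodup_pyRange_one a b
  have h1 : ((PySem.List.pyRange a b 1).filter (fun i => decide (P i))).Nodup := hnd.filter _
  rw [List.countP_eq_length_filter, ← List.toFinset_card_of_nodup h1]
  congr 1
  ext i
  simp [PySem.List.mem_pyRange_one, Finset.mem_Ico, and_assoc]

-- q = n / i is the complementary divisor
theorem codiv_facts (nI i : Int) (h2 : 2 ≤ nI) (hi : 1 ≤ i) (hd : i ∣ nI) :
    i * (nI / i) = nI ∧ 1 ≤ nI / i ∧ nI / i ≤ nI ∧ (nI / i) ∣ nI ∧ nI / (nI / i) = i := by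
  have hq : i * (nI / i) = nI := Int.mul_ediv_cancel' hd
  have hq1 : 1 ≤ nI / i := by nlinarith [hq]
  have hq2 : nI / i ≤ nI := by nlinarith [hq]
  have hqd : (nI / i) ∣ nI := Dvd.intro_left i hq
  have hinv : nI / (nI / i) = i := by
    have : (nI / i) * i = nI := by linarith [hq, mul_comm i (nI / i)]
    calc nI / (nI / i) = ((nI / i) * i) / (nI / i) := by rw [this]
    _ = i := Int.mul_ediv_cancel_left i (by omega)
  exact ⟨hq, hq1, hq2, hqd, hinv⟩

theorem card_high_eq_low (e nI : Int) (h2 : 2 ≤ nI) (hne : nI ≤ e) :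
    (((Finset.Ico 1 (e + 1)).filter (fun i => i ∣ nI ∧ nI < i * i)).card)
      = (((Finset.Ico 1 (e + 1)).filter (fun i => i ∣ nI ∧ i * i < nI)).card) := by
  apply Finset.card_bij' (fun i _ => nI / i) (fun i _ => nI / i)
  · intro i hi
    simp only [Finset.mem_filter, Finset.mem_Ico] at hi ⊢
    obtain ⟨⟨hi1, hi2⟩, hd, hgt⟩ := hi
    obtain ⟨hq, hq1, hq2, hqd, hinv⟩ := codiv_facts nI i h2 hi1 hd
    refine ⟨⟨hq1, by omega⟩, hqd, ?_⟩
    have hlt : nI / i < i := by nlinarith [hq]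
    nlinarith [hq]
  · intro i hi
    simp only [Finset.mem_filter, Finset.mem_Ico] at hi ⊢
    obtain ⟨⟨hi1, hi2⟩, hd, hlt⟩ := hi
    obtain ⟨hq, hq1, hq2, hqd, hinv⟩ := codiv_facts nI i h2 hi1 hd
    refine ⟨⟨hq1, by omega⟩, hqd, ?_⟩
    have hgt : i < nI / i := by nlinarith [hq]
    nlinarith [hq]
  · intro i hi
    simp only [Finset.mem_filter, Finset.mem_Ico] at hi
    exact (codiv_facts nI i h2 hi.1.1 hi.2.1).2.2.2.2
  · intro i hi
    simp only [Finset.mem_filter, Finset.mem_Ico] at hi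
    exact (codiv_facts nI i h2 hi.1.1 hi.2.1).2.2.2.2

theorem key_identity (e nI : Int) (h2 : 2 ≤ nI) (hne : nI ≤ e) :
    1 + (((Finset.Ico 2 (e + 1)).filter (fun i => i * i = nI)).card : Int)
      + 2 * (((Finset.Ico 2 (e + 1)).filter (fun i => i ∣ nI ∧ i * i < nI)).card : Int)
    = (((Finset.Ico 1 (e + 1)).filter (fun i => i ∣ nI ∧ i ≤ nI)).card : Int) - 1 := by
  have hSle : (Finset.Ico 1 (e + 1)).filter (fun i => i ∣ nI ∧ i ≤ nI)
      = (Finset.Ico 1 (e + 1)).filter (fun i => i ∣ nI) := by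
    apply Finset.filter_congr
    intro i hi
    simp only [Finset.mem_Ico] at hi
    constructor
    · intro h; exact h.1
    · intro h; exact ⟨h, Int.le_of_dvd (by omega) h⟩
  set S := (Finset.Ico 1 (e + 1)).filter (fun i => i ∣ nI) with hS
  set T := S.filter (fun i => ¬ i * i < nI) with hT
  have hsplit1 : (S.filter (fun i => i * i < nI)).card + T.card = S.card :=
    Finset.card_filter_add_card_filter_not (s := S) _
  have hsplit2 : (T.filter (fun i => i * i = nI)).card + (T.filter (fun i => ¬ i * i = nI)).card = T.card :=
    Finset.card_filter_add_card_filter_not (s := T) _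
  have hTeq : T.filter (fun i => i * i = nI) = (Finset.Ico 2 (e + 1)).filter (fun i => i * i = nI) := by
    ext i
    simp only [hT, hS, Finset.mem_filter, Finset.mem_Ico]
    constructor
    · rintro ⟨⟨⟨⟨h1, hlt⟩, hd⟩, hnl⟩, hsq⟩
      refine ⟨⟨?_, hlt⟩, hsq⟩
      rcases eq_or_lt_of_le h1 with h | h
      · exfalso; rw [← h] at hsq; omega
      · omega
    · rintro ⟨⟨h6, hlt⟩, hsq⟩
      exact ⟨⟨⟨⟨by omega, hlt⟩, Dvd.intro i hsq⟩, by simp [hsq]⟩, hsq⟩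
  have hTne : T.filter (fun i => ¬ i * i = nI)
      = (Finset.Ico 1 (e + 1)).filter (fun i => i ∣ nI ∧ nI < i * i) := by
    ext i
    simp only [hT, hS, Finset.mem_filter, Finset.mem_Ico]
    constructor
    · rintro ⟨⟨⟨⟨h1, hlt⟩, hd⟩, hnl⟩, hne'⟩
      exact ⟨⟨h1, hlt⟩, hd, (not_lt.1 hnl).lt_of_ne (fun h => hne' h.symm)⟩
    · rintro ⟨⟨h1, hlt⟩, hd, hgt⟩
      exact ⟨⟨⟨⟨h1, hlt⟩, hd⟩, not_lt.2 hgt.le⟩, ne_of_gt hgt⟩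
  have hlow : S.filter (fun i => i * i < nI)
      = insert 1 ((Finset.Ico 2 (e + 1)).filter (fun i => i ∣ nI ∧ i * i < nI)) := by
    ext i
    simp only [hS, Finset.mem_filter, Finset.mem_Ico, Finset.mem_insert]
    constructor
    · rintro ⟨⟨⟨h1, hlt⟩, hd⟩, hsl⟩
      rcases eq_or_lt_of_le h1 with h | h
      · exact Or.inl h.symm
      · exact Or.inr ⟨⟨by omega, hlt⟩, hd, hsl⟩
    · rintro (rfl | ⟨⟨h6, hlt⟩, hd, hsl⟩)
      · exact ⟨⟨⟨le_refl 1, by omega⟩, one_dvd _⟩, by omega⟩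
      · exact ⟨⟨⟨by omega, hlt⟩, hd⟩, hsl⟩
  have hnotmem : (1 : Int) ∉ (Finset.Ico 2 (e + 1)).filter (fun i => i ∣ nI ∧ i * i < nI) := by
    simp only [Finset.mem_filter, Finset.mem_Ico]
    rintro ⟨⟨h, -⟩, -⟩; omega
  have hcard_low : (S.filter (fun i => i * i < nI)).card
      = ((Finset.Ico 2 (e + 1)).filter (fun i => i ∣ nI ∧ i * i < nI)).card + 1 := by
    rw [hlow, Finset.card_insert_of_notMem hnotmem]
  have hSl' : S.filter (fun i => i * i < nI)
      = (Finset.Ico 1 (e + 1)).filter (fun i => i ∣ nI ∧ i * i < nI) := by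
    rw [hS, Finset.filter_filter]
  have hhl := card_high_eq_low e nI h2 hne
  rw [hTeq, hTne] at hsplit2
  rw [hSl'] at hsplit1 hcard_low
  rw [hSle]
  omega

theorem cntJ_eq (e : Int) (n : Nat) (i : Int) (hi : 2 ≤ i) (h2 : 2 ≤ (n : Int)) (hne : (n : Int) ≤ e) :
    cntJ e n i = if i ∣ (n : Int) ∧ i * i < (n : Int) then 1 else 0 := by
  unfold cntJ
  by_cases hc : i ∣ (n : Int) ∧ i * i < (n : Int)
  · obtain ⟨hd, hlt⟩ := hc
    obtain ⟨hq, hq1, hq2, hqd, hinv⟩ := codiv_facts (n : Int) i h2 (by omega) hd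
    set q := (n : Int) / i with hqdef
    have hiq : i < q := by nlinarith
    have hfun : (fun j => decide (i * j ≤ e) && decide (i * j = (n : Int))) = (fun j => j == q) := by
      funext j
      by_cases h : j = q
      · subst h; simp [hq, hne]
      · have : i * j ≠ (n : Int) := by
          intro hc'
          exact h (mul_left_cancel₀ (by omega : i ≠ 0) (by rw [hc', hq]))
        simp [this, h]
    rw [hfun]
    have hmem : q ∈ PySem.List.pyRange (i + 1) (e + 1) 1 :=
      PySem.List.mem_pyRange_one.2 ⟨by omega, by omega⟩
    rw [show (List.countP (fun j => j == q) (PySem.List.pyRange (i+1) (e+1) 1))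
        = List.count q (PySem.List.pyRange (i+1) (e+1) 1) from rfl]
    rw [List.count_eq_one_of_mem (PySem.List.nodup_pyRange_one _ _) hmem]
    simp [hd, hlt]
  · have hz : (PySem.List.pyRange (i + 1) (e + 1) 1).countP
        (fun j => decide (i * j ≤ e) && decide (i * j = (n : Int))) = 0 := by
      rw [List.countP_eq_zero]
      intro j hj
      have hj' := PySem.List.mem_pyRange_one.1 hj
      simp only [Bool.and_eq_true, decide_eq_true_eq]
      rintro ⟨-, heq⟩
      apply hc
      refine ⟨Dvd.intro j heq, ?_⟩
      have : i * i < i * j := by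
        apply mul_lt_mul_of_pos_left (by omega) (by omega)
      omega
    simp [hz, hc]

theorem checkerA_eval (e : Int) (n : Nat) (h2 : 2 ≤ (n : Int)) (hne : (n : Int) ≤ e) :
    (solA_outer e (PySem.List.pyRange 2 (e + 1) 1)
        ((PySem.List.pyRange 0 (e + 1) 1).map (fun _ => (1 : Int)))).getD n 0
      = 1 + (((Finset.Ico 2 (e + 1)).filter (fun i => i * i = (n : Int))).card : Int)
          + 2 * (((Finset.Ico 2 (e + 1)).filter (fun i => i ∣ (n : Int) ∧ i * i < (n : Int))).card : Int) := by
  rw [checkerA_getD e n (by omega)]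
  unfold contribA
  rw [PySem.List.sum_map_add_int]
  have hsq : ((PySem.List.pyRange 2 (e + 1) 1).map (fun i => if i * i = (n : Int) then (1:Int) else 0)).sum
      = (((Finset.Ico 2 (e + 1)).filter (fun i => i * i = (n : Int))).card : Int) := by
    rw [sum_map_ite_prop _ (fun i => i * i = (n : Int)), countP_pyRange_eq_card]
  have hcnt : ((PySem.List.pyRange 2 (e + 1) 1).map (fun i => 2 * cntJ e n i)).sum
      = 2 * (((Finset.Ico 2 (e + 1)).filter (fun i => i ∣ (n : Int) ∧ i * i < (n : Int))).card : Int) := by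
    rw [List.sum_map_mul_left]
    have : ((PySem.List.pyRange 2 (e + 1) 1).map (cntJ e n)).sum
        = ((PySem.List.pyRange 2 (e + 1) 1).map
            (fun i => if i ∣ (n : Int) ∧ i * i < (n : Int) then (1:Int) else 0)).sum := by
      congr 1
      apply List.map_congr_left
      intro i hi
      exact cntJ_eq e n i (by have := PySem.List.mem_pyRange_one.1 hi; omega) h2 hne
    rw [this, sum_map_ite_prop _ (fun i => i ∣ (n : Int) ∧ i * i < (n : Int)), countP_pyRange_eq_card]
  rw [hsq, hcnt]
  ring

theorem checkerA_small (e : Int) (n : Nat) (hn1 : (n : Int) ≤ 1) (hne : (n : Int) < e + 1) :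
    (solA_outer e (PySem.List.pyRange 2 (e + 1) 1)
        ((PySem.List.pyRange 0 (e + 1) 1).map (fun _ => (1 : Int)))).getD n 0 = 1 := by
  rw [checkerA_getD e n hne]
  have hz : ∀ x ∈ (PySem.List.pyRange 2 (e + 1) 1).map (contribA e n), x = 0 := by
    intro x hx
    obtain ⟨i, hi, rfl⟩ := List.mem_map.1 hx
    have hi' := PySem.List.mem_pyRange_one.1 hi
    unfold contribA cntJ
    have h1 : ¬ (i * i = (n : Int)) := by nlinarith [hi'.1]
    have hz2 : (PySem.List.pyRange (i + 1) (e + 1) 1).countP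
        (fun j => decide (i * j ≤ e) && decide (i * j = (n : Int))) = 0 := by
      rw [List.countP_eq_zero]
      intro j hj
      have hj' := PySem.List.mem_pyRange_one.1 hj
      simp only [Bool.and_eq_true, decide_eq_true_eq]
      rintro ⟨-, heq⟩
      nlinarith [hi'.1, hj'.1]
    simp [h1, hz2]
  rw [List.sum_eq_zero hz]; ring

theorem length_solB_sieve (e : Int) : (solB_sieve e).length = (e + 1).toNat := by
  unfold solB_sieve
  have : ∀ (is : List Int) (d : List Int),
      (is.foldl (fun d i => (PySem.List.pyRange i (e + 1) i).foldl (fun d j => pvBump d j 1) d) d).length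
        = d.length := by
    intro is
    induction is with
    | nil => intro d; rfl
    | cons i rest ih =>
      intro d
      simp only [List.foldl_cons]
      rw [ih, length_foldl_pvBump (fun j => j)]
  rw [this]
  simp [PySem.List.length_pyRange_one]

theorem sieve_eval (e : Int) (n : Nat) (hne : (n : Int) < e + 1) :
    (solB_sieve e).getD n 0
      = (((Finset.Ico 1 (e + 1)).filter (fun i => i ∣ (n : Int) ∧ i ≤ (n : Int))).card : Int) := by
  unfold solB_sieve
  have hlen : ((PySem.List.pyRange 0 (e + 1) 1).map (fun _ => (0 : Int))).length = (e + 1).toNat := by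
    simp [PySem.List.length_pyRange_one]
  rw [getD_sieve_fold e n _ (fun i hi => by have := PySem.List.mem_pyRange_one.1 hi; omega) _
      (by rw [hlen]; omega)]
  have hinit : ((PySem.List.pyRange 0 (e + 1) 1).map (fun _ => (0 : Int))).getD n 0 = 0 := by
    rw [List.getD_eq_getElem _ _ (by rw [hlen]; omega)]
    simp
  rw [hinit]
  have hmc : ((PySem.List.pyRange 1 (e + 1) 1).map
        (fun i => ((PySem.List.pyRange i (e + 1) i).countP (fun j => decide (j = (n : Int))) : Int))).sum
      = ((PySem.List.pyRange 1 (e + 1) 1).map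
        (fun i => if i ∣ (n : Int) ∧ i ≤ (n : Int) then (1:Int) else 0)).sum := by
    congr 1
    apply List.map_congr_left
    intro i hi
    exact countP_multiples e i n (by have := PySem.List.mem_pyRange_one.1 hi; omega) (by omega)
  rw [hmc, sum_map_ite_prop _ (fun i => i ∣ (n : Int) ∧ i ≤ (n : Int)), countP_pyRange_eq_card]
  simp

theorem checker_lists_eq (e : Int) :
    solA_outer e (PySem.List.pyRange 2 (e + 1) 1) ((PySem.List.pyRange 0 (e + 1) 1).map (fun _ => (1 : Int)))
      = (PySem.List.enumerate (solB_sieve e) 0).map (fun nc => if 2 ≤ nc.1 then nc.2 - 1 else 1) := by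
  have hlenA : (solA_outer e (PySem.List.pyRange 2 (e + 1) 1)
      ((PySem.List.pyRange 0 (e + 1) 1).map (fun _ => (1 : Int)))).length = (e + 1).toNat := by
    rw [length_solA_outer]
    simp [PySem.List.length_pyRange_one]
  have hlenB : ((PySem.List.enumerate (solB_sieve e) 0).map
      (fun nc => if 2 ≤ nc.1 then nc.2 - 1 else 1) : List Int).length = (e + 1).toNat := by
    rw [List.length_map, PySem.List.length_enumerate, length_solB_sieve]
  apply List.ext_getElem (by rw [hlenA, hlenB])
  intro n hA hB
  have hn : n < (e + 1).toNat := by rw [← hlenA]; exact hA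
  have hnB : n < (solB_sieve e).length := by rw [length_solB_sieve]; exact hn
  have hRHS : ((PySem.List.enumerate (solB_sieve e) 0).map
      (fun nc => if 2 ≤ nc.1 then nc.2 - 1 else 1) : List Int)[n]'hB
      = if 2 ≤ (n : Int) then (solB_sieve e)[n]'hnB - 1 else 1 := by
    rw [List.getElem_map]
    rw [PySem.List.getElem_enumerate]
    simp
  rw [hRHS]
  rw [← List.getD_eq_getElem _ 0 hA, ← List.getD_eq_getElem _ 0 hnB]
  by_cases h2 : 2 ≤ (n : Int)
  · rw [if_pos h2]
    rw [checkerA_eval e n h2 (by omega), sieve_eval e n (by omega)]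
    have := key_identity e (n : Int) h2 (by omega)
    omega
  · rw [if_neg h2]
    exact checkerA_small e n (by omega) (by omega)

theorem dp_eq (checker : List Int) :
    ∀ (idxs : List Int) (st : List Int × Int × Int),
    solA_dp checker idxs st = solB_dp checker idxs st := by
  intro idxs
  induction idxs with
  | nil => intro st; rfl
  | cons i rest ih =>
    rintro ⟨dp, hd, hi⟩
    simp only [solA_dp, solB_dp]
    exact ih _

theorem dp_range_eq (e : Int) :
    PySem.List.pyRange (((e + 1).toNat : Int) - 1) 0 (-1) = PySem.List.pyRange e 0 (-1) := by
  by_cases h : 0 ≤ e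
  · congr 1
    omega
  · rw [PySem.List.pyRange_neg_one_eq_nil (by omega), PySem.List.pyRange_neg_one_eq_nil (by omega)]

theorem ports_eq (e : Int) (starts : List Int) : solution e starts = solution_alt e starts := by
  unfold solution solution_alt
  simp only []
  rw [checker_lists_eq e]
  rw [List.length_map, PySem.List.length_enumerate, length_solB_sieve]
  rw [dp_range_eq e, dp_eq]

-- ===== VERDICT (by name: the statement is the Claim_ definition above) =====
theorem solution_spec : Claim_equal_solution := by
  intro e starts _ _
  unfold Spec_solution
  exact ports_eq e starts
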